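-- pv_equiv track=rewrite | github.com/koblosistvan/fakt2023 | Köblös Mandula/gyakoro/szöveg elemzés.py | darab
-- ===== SOURCE A (Python) =====
-- írásjelek = '.!?'
--
-- kijelentő = '.'
--
-- kérdő = '?'
--
-- felszólító = '!'
--
-- def darab(szöveg):
--     felszólító_mondat = 0
--     kérdő_mondat = 0
--     kijelentő_mondat = 0
--     mondatok = 0
--     szavak = szöveg.split(' ')
--     for i in range(len(szavak)):
--         if szavak[i][-1] in írásjelek:
--             mondatok += 1
--         if szavak[i][-1] == kijelentő:
--             kijelentő_mondat += 1
--         if szavak[i][-1] == kérdő: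
--             kérdő_mondat += 1
--         if szavak[i][-1] == felszólító:
--             felszólító_mondat += 1
--     return mondatok, kijelentő_mondat, kérdő_mondat, felszólító_mondat
-- ===== SOURCE B (Python) =====
-- # B: collect last characters first, tally each punctuation with .count, total = sum of tallies.
-- def darab(szöveg):
--     végek = [szó[-1] for szó in szöveg.split(' ')]
--     kijelentő_mondat = végek.count('.')
--     kérdő_mondat = végek.count('?')
--     felszólító_mondat = végek.count('!')
--     return (kijelentő_mondat + kérdő_mondat + felszólító_mondat,
--             kijelentő_mondat, kérdő_mondat, felszólító_mondat)
-- ===== Notes on version B (the rewrite author's own statement) =====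
-- stated objective: simpler
-- what changed: B first builds the list of word-ending characters, counts '.', '?' and '!' separately with list.count, and returns the total as the sum of those three counts, instead of A's fused index loop that re-tests each ending four times against accumulators.
import Mathlib
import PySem

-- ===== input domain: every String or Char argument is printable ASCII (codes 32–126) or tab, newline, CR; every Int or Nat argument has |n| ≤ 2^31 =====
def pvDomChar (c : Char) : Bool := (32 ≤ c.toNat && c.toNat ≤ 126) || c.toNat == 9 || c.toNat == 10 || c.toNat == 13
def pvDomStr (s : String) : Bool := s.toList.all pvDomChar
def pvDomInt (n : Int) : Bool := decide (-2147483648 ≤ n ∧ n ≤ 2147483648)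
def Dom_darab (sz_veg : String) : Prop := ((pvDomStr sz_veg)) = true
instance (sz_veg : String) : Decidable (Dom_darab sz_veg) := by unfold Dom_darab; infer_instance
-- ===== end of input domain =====

-- B collects the word-ending characters, tallies '.', '?', '!' separately and returns the
-- total as the sum of the tallies, instead of A's fused four-accumulator index loop.

-- ===== PORT A =====
-- szavak = szöveg.split(' '); last char szavak[i][-1] via pyGet? (the .getD ' ' default is
-- reached only outside Pre_, where Python raises IndexError); single-char 'c in ".!?"' is
-- ported as membership of the character in ['.', '!', '?'].
def darab (sz_veg : String) : Int × Int × Int × Int :=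
  let szavak : List (List Char) := PySem.Chars.splitOn sz_veg.toList [' ']
  (PySem.List.pyRange 0 (PySem.List.len szavak) 1).foldl
    (fun (st : Int × Int × Int × Int) i =>
      let w := PySem.List.pyGetD szavak i []
      let c := (PySem.List.pyGet? w (-1)).getD ' '
      let mondatok := if c ∈ (['.', '!', '?'] : List Char) then st.1 + 1 else st.1
      let kij := if c = '.' then st.2.1 + 1 else st.2.1
      let ker := if c = '?' then st.2.2.1 + 1 else st.2.2.1
      let fel := if c = '!' then st.2.2.2 + 1 else st.2.2.2
      (mondatok, kij, ker, fel))
    (0, 0, 0, 0)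

-- ===== PORT B =====
def darab_alt (sz_veg : String) : Int × Int × Int × Int :=
  let vegek : List Char :=
    (PySem.Chars.splitOn sz_veg.toList [' ']).map (fun w => (PySem.List.pyGet? w (-1)).getD ' ')
  let kij : Int := PySem.List.count vegek '.'
  let ker : Int := PySem.List.count vegek '?'
  let fel : Int := PySem.List.count vegek '!'
  (kij + ker + fel, kij, ker, fel)

-- ===== PRECONDITION & SPEC =====
-- Pre_ excludes exactly the inputs with an empty space-separated word (leading/trailing or
-- doubled spaces, the empty string): there Python A raises IndexError on szavak[i][-1] (B raises too).
def Pre_darab (sz_veg : String) : Prop :=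
  ∀ w ∈ PySem.Chars.splitOn sz_veg.toList [' '], w ≠ []
instance (sz_veg : String) : Decidable (Pre_darab sz_veg) := by unfold Pre_darab; infer_instance
def pvWitness_darab : String := "hi. ok? go! word"

def Spec_darab (sz_veg : String) (out : Int × Int × Int × Int) : Prop := out = darab_alt sz_veg
instance (sz_veg : String) (out : Int × Int × Int × Int) : Decidable (Spec_darab sz_veg out) := by unfold Spec_darab; infer_instance

-- ===== CLAIM (what is proved, stated in full; the proofs are below) =====
def Claim_equal_darab : Prop := ∀ (sz_veg : String), Dom_darab sz_veg → Pre_darab sz_veg → Spec_darab sz_veg (darab sz_veg)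

-- ===== LEMMAS AND PROOFS =====

-- per-character fact: counting membership in ".!?" is the sum of the three equality counts
lemma countP_mem_eq_sum (l : List Char) :
    l.countP (fun c => c ∈ (['.', '!', '?'] : List Char)) =
      l.count '.' + l.count '?' + l.count '!' := by
  induction l with
  | nil => simp
  | cons x xs ih =>
    rw [List.countP_cons, List.count_cons, List.count_cons, List.count_cons]
    by_cases h1 : x = '.' <;> by_cases h2 : x = '?' <;> by_cases h3 : x = '!' <;>
      simp_all <;> omega

-- A's fused loop, over an arbitrary word list and accumulator, expressed by B's counts
lemma fold_counts (ws : List (List Char)) (m a b c : Int) :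
    ws.foldl
      (fun (st : Int × Int × Int × Int) w =>
        (if (PySem.List.pyGet? w (-1)).getD ' ' ∈ (['.', '!', '?'] : List Char) then st.1 + 1 else st.1,
         if (PySem.List.pyGet? w (-1)).getD ' ' = '.' then st.2.1 + 1 else st.2.1,
         if (PySem.List.pyGet? w (-1)).getD ' ' = '?' then st.2.2.1 + 1 else st.2.2.1,
         if (PySem.List.pyGet? w (-1)).getD ' ' = '!' then st.2.2.2 + 1 else st.2.2.2)) (m, a, b, c)
    = (m + ((ws.map (fun w => (PySem.List.pyGet? w (-1)).getD ' ')).countP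
              (fun ch => ch ∈ (['.', '!', '?'] : List Char)) : Int),
       a + ((ws.map (fun w => (PySem.List.pyGet? w (-1)).getD ' ')).count '.' : Int),
       b + ((ws.map (fun w => (PySem.List.pyGet? w (-1)).getD ' ')).count '?' : Int),
       c + ((ws.map (fun w => (PySem.List.pyGet? w (-1)).getD ' ')).count '!' : Int)) := by
  induction ws generalizing m a b c with
  | nil => simp
  | cons w ws ih =>
    simp only [List.foldl_cons, List.map_cons, List.countP_cons, List.count_cons]
    rw [ih]
    refine Prod.ext ?_ (Prod.ext ?_ (Prod.ext ?_ ?_)) <;>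
      · simp only []
        split_ifs <;> simp_all <;> omega

-- ===== VERDICT (by name: the statement is the Claim_ definition above) =====
theorem darab_spec : Claim_equal_darab := by
  intro sz_veg _ _
  show darab sz_veg = darab_alt sz_veg
  unfold darab darab_alt
  refine Eq.trans
    (PySem.List.foldl_pyRange_zero_pyGetD (PySem.Chars.splitOn sz_veg.toList [' ']) []
      (fun (st : Int × Int × Int × Int) (w : List Char) =>
        (if (PySem.List.pyGet? w (-1)).getD ' ' ∈ (['.', '!', '?'] : List Char) then st.1 + 1 else st.1,
         if (PySem.List.pyGet? w (-1)).getD ' ' = '.' then st.2.1 + 1 else st.2.1,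
         if (PySem.List.pyGet? w (-1)).getD ' ' = '?' then st.2.2.1 + 1 else st.2.2.1,
         if (PySem.List.pyGet? w (-1)).getD ' ' = '!' then st.2.2.2 + 1 else st.2.2.2))
      (0, 0, 0, 0)) ?_
  rw [fold_counts, countP_mem_eq_sum]
  simp [PySem.List.count_eq]
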